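-- pv_equiv track=rewrite | github.com/trindadea/eda1 | 1.4.py | primos_gemeos
-- ===== SOURCE A (Python) =====
-- def primos_gemeos(n):
--     pares = 0
--     i = 3
--     cont = 0
--     primos=[2]
--     gemeos=[]
--
--
--     while pares != n:
--         for j in range (i,1,-1):
--             if i%j == 0:
--                 cont = cont + 1
--
--         if cont == 1:
--             primos.append(i)
--
--             if primos[len(primos)-1] == primos[len(primos)-2] + 2:
--                 gemeos.append(((primos[len(primos)-2], primos[len(primos)-1])))
--                 pares = pares + 1
--
--         cont = 0
--         i = i + 1
--
--     return gemeos
-- ===== SOURCE B (Python) =====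
-- def eh_primo(i):
--     if i % 2 == 0:
--         return i == 2
--     d = 3
--     while d * d <= i:
--         if i % d == 0:
--             return False
--         d += 2
--     return True
--
--
-- def primos_gemeos(n):
--     gemeos = []
--     prev = 2
--     i = 3
--     while len(gemeos) < n:
--         if eh_primo(i):
--             if i == prev + 2:
--                 gemeos.append((prev, i))
--             prev = i
--         i += 1
--     return gemeos
-- ===== Notes on version B (the rewrite author's own statement) =====
-- stated objective: faster
-- what changed: Replaces A's full divisor count over range(i,1,-1) and its growing list of all primes with a trial division by odd divisors up to sqrt(i) that exits at the first divisor, keeping only the previous prime instead of the whole list.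
import Mathlib
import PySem

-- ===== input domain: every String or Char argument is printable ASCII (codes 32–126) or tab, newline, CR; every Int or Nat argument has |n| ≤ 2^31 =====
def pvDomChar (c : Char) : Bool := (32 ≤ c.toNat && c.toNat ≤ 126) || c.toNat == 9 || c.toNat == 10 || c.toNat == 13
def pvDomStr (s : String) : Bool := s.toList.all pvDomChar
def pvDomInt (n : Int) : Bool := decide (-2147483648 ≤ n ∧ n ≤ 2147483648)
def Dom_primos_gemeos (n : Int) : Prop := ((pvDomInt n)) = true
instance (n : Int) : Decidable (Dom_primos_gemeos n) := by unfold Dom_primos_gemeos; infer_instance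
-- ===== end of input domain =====

-- B replaces A's full divisor count over range(i,1,-1) and its list of all primes by trial division
-- by odd divisors up to sqrt(i) with early exit, keeping only the previous prime.
-- Both ports bound their Python 'while' with the same fuel (one unit per candidate i); the fuel only
-- makes the transcription total: both ports step through candidates identically, so agreement never
-- rests on the bound.

-- ===== PORT A =====
-- 'for j in range(i,1,-1): if i%j==0: cont+=1'
def pvContA (i : Int) : Int :=
  (PySem.List.pyRange i 1 (-1)).foldl (fun cont j => if PySem.Int.mod i j = 0 then cont + 1 else cont) 0

-- the 'while pares != n' loop; the indices primos[len-1]/primos[len-2] are always in range, so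
-- List.getD with a Nat index is exact here
def pvLoopA (fuel : Nat) (n pares i : Int) (primos : List Int) (gemeos : List (Int × Int)) :
    List (Int × Int) :=
  match fuel with
  | 0 => gemeos
  | f+1 =>
    if pares ≠ n then
      if pvContA i = 1 then
        let primos' := primos ++ [i]
        if primos'.getD (primos'.length - 1) 0 = primos'.getD (primos'.length - 2) 0 + 2 then
          pvLoopA f n (pares + 1) (i + 1) primos'
            (gemeos ++ [(primos'.getD (primos'.length - 2) 0, primos'.getD (primos'.length - 1) 0)])
        else pvLoopA f n pares (i + 1) primos' gemeos
      else pvLoopA f n pares (i + 1) primos gemeos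
    else gemeos

def primos_gemeos (n : Int) : List (Int × Int) := pvLoopA (2 ^ 64) n 0 3 [2] []

-- ===== PORT B =====
-- 'while d*d <= i: if i % d == 0: return False; d += 2' (fuel i.toNat suffices: d grows past i)
def pvEhPrimoLoop (i d : Int) (fuel : Nat) : Bool :=
  match fuel with
  | 0 => true
  | f+1 => if d * d ≤ i then (if PySem.Int.mod i d = 0 then false else pvEhPrimoLoop i (d + 2) f)
           else true

def pvEhPrimo (i : Int) : Bool :=
  if PySem.Int.mod i 2 = 0 then i == 2 else pvEhPrimoLoop i 3 i.toNat

def pvLoopB (fuel : Nat) (n prev i : Int) (gemeos : List (Int × Int)) : List (Int × Int) :=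
  match fuel with
  | 0 => gemeos
  | f+1 =>
    if (gemeos.length : Int) < n then
      if pvEhPrimo i then
        pvLoopB f n i (i + 1) (if i = prev + 2 then gemeos ++ [(prev, i)] else gemeos)
      else pvLoopB f n prev (i + 1) gemeos
    else gemeos

def primos_gemeos_alt (n : Int) : List (Int × Int) := pvLoopB (2 ^ 64) n 2 3 []

-- ===== PRECONDITION & SPEC =====
-- Pre_ excludes n < 0, where A's 'while pares != n' never terminates (pares only grows from 0).
def Pre_primos_gemeos (n : Int) : Prop := 0 ≤ n
instance (n : Int) : Decidable (Pre_primos_gemeos n) := by unfold Pre_primos_gemeos; infer_instance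
def pvWitness_primos_gemeos : Int := 3

def Spec_primos_gemeos (n : Int) (out : List (Int × Int)) : Prop := out = primos_gemeos_alt n
instance (n : Int) (out : List (Int × Int)) : Decidable (Spec_primos_gemeos n out) := by
  unfold Spec_primos_gemeos; infer_instance

-- ===== CLAIM (what is proved, stated in full; the proofs are below) =====
def Claim_equal_primos_gemeos : Prop :=
  ∀ (n : Int), Dom_primos_gemeos n → Pre_primos_gemeos n → Spec_primos_gemeos n (primos_gemeos n)

-- ===== LEMMAS AND PROOFS =====

-- A's divisor count over [i, i-1, …, 2] equals 1 exactly on primes (for i ≥ 3)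
theorem pvContA_eq_one_iff (i : Int) (hi : 3 ≤ i) : pvContA i = 1 ↔ Nat.Prime i.toNat := by
  have hmi : ((i.toNat : Int)) = i := Int.toNat_of_nonneg (by omega)
  set m := i.toNat with hm
  set R := PySem.List.pyRange 2 (i+1) 1 with hR
  set p : Int → Bool := fun j => decide (PySem.Int.mod i j = 0) with hp
  have hcount : pvContA i = (R.countP p : Int) := by
    unfold pvContA
    rw [PySem.List.foldl_ite_add_one, PySem.List.pyRange_neg_one_eq_reverse]
    norm_num [List.countP_reverse, hR, hp]
  have hmem : ∀ j : Int, j ∈ R ↔ 2 ≤ j ∧ j < i + 1 := fun j => PySem.List.mem_pyRange_one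
  have hnd : R.Nodup := PySem.List.nodup_pyRange_one 2 (i+1)
  have hpdvd : ∀ j : Int, p j = true ↔ j ∣ i := by
    intro j; simp [hp, PySem.Int.mod_eq_zero_iff_dvd]
  have hiR : i ∈ R := (hmem i).mpr (by omega)
  rw [hcount]
  constructor
  · -- count = 1 → prime
    intro h1
    by_contra hnp
    obtain ⟨k, hk, hk2, hkm⟩ := Nat.exists_dvd_of_not_prime2 (by omega) hnp
    have hkR : (k : Int) ∈ R := (hmem k).mpr (by omega)
    have hpk : p (k : Int) = true := (hpdvd _).mpr (by exact_mod_cast hmi ▸ Int.natCast_dvd_natCast.mpr hk)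
    have hpi : p i = true := (hpdvd _).mpr dvd_rfl
    have hki : (k : Int) ≠ i := by omega
    -- two distinct elements of the filter bound countP from below
    have hkf : (k : Int) ∈ R.filter p := List.mem_filter.mpr ⟨hkR, hpk⟩
    have hif : i ∈ R.filter p := List.mem_filter.mpr ⟨hiR, hpi⟩
    have hsub : ({(k : Int), i} : Finset Int) ⊆ (R.filter p).toFinset := by
      intro x hx; simp only [Finset.mem_insert, Finset.mem_singleton] at hx
      rcases hx with rfl | rfl
      · exact List.mem_toFinset.mpr hkf
      · exact List.mem_toFinset.mpr hif
    have hcard := Finset.card_le_card hsub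
    rw [Finset.card_pair hki] at hcard
    have := List.toFinset_card_le (R.filter p)
    rw [← List.countP_eq_length_filter] at *
    omega
  · -- prime → only j = i divides, so the count is R.count i = 1
    intro hpr
    have : R.countP p = R.countP (fun j => j == i) := by
      apply List.countP_congr
      intro j hj
      have hj2 := (hmem j).mp hj
      simp only [hpdvd, beq_iff_eq]
      constructor
      · intro hd
        have hjn : (j.toNat : Int) = j := Int.toNat_of_nonneg (by omega)
        have : j.toNat ∣ m := by
          rw [← Int.natCast_dvd_natCast, hjn, hmi]; exact hd
        rcases hpr.eq_one_or_self_of_dvd _ this with h | h <;> omega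
      · rintro rfl; exact dvd_rfl
    rw [this]
    have : R.countP (fun j => j == i) = R.count i := List.count_eq_countP.symm
    rw [this, List.count_eq_one_of_mem hnd hiR]; norm_num

-- B's odd-trial-division loop decides primality (for odd i ≥ 3), given no divisor below d
theorem pvEhPrimoLoop_iff (i : Int) (hi : 3 ≤ i) (hodd : ¬ (2 : Int) ∣ i) :
    ∀ (fuel : Nat) (d : Int), 3 ≤ d → d % 2 = 1 →
      (∀ e : Int, 2 ≤ e → e < d → ¬ e ∣ i) → i < d + 2 * fuel →
      (pvEhPrimoLoop i d fuel = true ↔ Nat.Prime i.toNat) := by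
  have hmi : ((i.toNat : Int)) = i := Int.toNat_of_nonneg (by omega)
  intro fuel
  induction fuel with
  | zero =>
    intro d hd3 hdo hinv hb
    exact absurd dvd_rfl (hinv i (by omega) (by omega))
  | succ f ih =>
    intro d hd3 hdo hinv hb
    simp only [pvEhPrimoLoop]
    by_cases hdd : d * d ≤ i
    · simp only [hdd, if_true]
      by_cases hmod : PySem.Int.mod i d = 0
      · simp only [hmod, if_true]
        have hddvd : d ∣ i := (PySem.Int.mod_eq_zero_iff_dvd i d).mp hmod
        have hdi : d < i := by nlinarith
        constructor
        · intro h; exact absurd h (by simp)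
        · intro hpr
          exfalso
          have hdn : (d.toNat : Int) = d := Int.toNat_of_nonneg (by omega)
          have : d.toNat ∣ i.toNat := by
            rw [← Int.natCast_dvd_natCast, hdn, hmi]; exact hddvd
          rcases hpr.eq_one_or_self_of_dvd _ this with h | h <;> omega
      · simp only [hmod, if_false]
        apply ih (d + 2) (by omega) (by omega) _ (by omega)
        intro e he2 hed
        rcases lt_or_ge e d with h | h
        · exact hinv e he2 h
        · rcases (by omega : e = d ∨ e = d + 1) with rfl | rfl
          · exact fun hdvd => hmod ((PySem.Int.mod_eq_zero_iff_dvd i e).mpr hdvd)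
          · intro hdvd
            have h2e : (2 : Int) ∣ d + 1 := by omega
            exact hodd (h2e.trans hdvd)
    · simp only [hdd, if_false]
      constructor
      · intro _
        by_contra hnp
        set m := i.toNat with hm
        have hm1 : m ≠ 1 := by omega
        have hpf := Nat.minFac_prime hm1
        have hdvd := Nat.minFac_dvd m
        have hsq := Nat.minFac_sq_le_self (by omega) hnp
        set q := m.minFac with hq
        have h2q : 2 ≤ q := hpf.two_le
        have hqi : (q : Int) * q ≤ i := by
          rw [← hmi]; exact_mod_cast (by nlinarith [hsq] : q * q ≤ m)
        have hqd : (q : Int) < d := by nlinarith [hqi, hdd, h2q, hd3]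
        refine hinv (q : Int) (by exact_mod_cast h2q) hqd ?_
        rw [← hmi]; exact_mod_cast hdvd
      · intro _; trivial

theorem pvEhPrimo_iff (i : Int) (hi : 3 ≤ i) : pvEhPrimo i = true ↔ Nat.Prime i.toNat := by
  unfold pvEhPrimo
  by_cases h2 : PySem.Int.mod i 2 = 0
  · have hdvd : (2 : Int) ∣ i := (PySem.Int.mod_eq_zero_iff_dvd i 2).mp h2
    simp only [h2, if_true]
    constructor
    · intro h
      exfalso
      have hi2 : i = 2 := by simpa using h
      omega
    · intro hpr
      exfalso
      have : (2 : Nat) ∣ i.toNat := by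
        rw [← Int.natCast_dvd_natCast]; rwa [Int.toNat_of_nonneg (by omega : (0:Int) ≤ i)]
      rcases hpr.eq_one_or_self_of_dvd _ this with h | h <;> omega
  · simp only [h2, if_false]
    apply pvEhPrimoLoop_iff i hi
    · exact fun hdvd => h2 ((PySem.Int.mod_eq_zero_iff_dvd i 2).mpr hdvd)
    · omega
    · omega
    · intro e he2 hed
      have : e = 2 := by omega
      subst this
      exact fun hdvd => h2 ((PySem.Int.mod_eq_zero_iff_dvd i 2).mpr hdvd)
    · omega

-- the two fueled loops agree step for step: A's pares is gemeos.length, A's primos ends in B's prev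
theorem pvLoop_eq (fuel : Nat) :
    ∀ (n prev i : Int) (ps : List Int) (gemeos : List (Int × Int)), 3 ≤ i →
      (gemeos.length : Int) ≤ n →
      pvLoopA fuel n (gemeos.length : Int) i (ps ++ [prev]) gemeos = pvLoopB fuel n prev i gemeos := by
  induction fuel with
  | zero => intro n prev i ps g _ _; rfl
  | succ f ih =>
    intro n prev i ps g hi hle
    simp only [pvLoopA, pvLoopB]
    by_cases hstop : (g.length : Int) = n
    · simp [hstop]
    · have hlt : (g.length : Int) < n := by omega
      simp only [hstop, hlt, ne_eq, not_false_iff, if_pos]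
      by_cases hpr : Nat.Prime i.toNat
      · rw [if_pos ((pvContA_eq_one_iff i hi).mpr hpr), if_pos ((pvEhPrimo_iff i hi).mpr hpr)]
        have hassoc : (ps ++ [prev]) ++ [i] = ps ++ [prev, i] := by simp
        have hlast : ((ps ++ [prev]) ++ [i]).getD (((ps ++ [prev]) ++ [i]).length - 1) 0 = i := by
          rw [hassoc]; simp
        have hprev : ((ps ++ [prev]) ++ [i]).getD (((ps ++ [prev]) ++ [i]).length - 2) 0 = prev := by
          rw [hassoc]; simp
        simp only [hlast, hprev]
        by_cases htwin : i = prev + 2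
        · rw [if_pos htwin, if_pos htwin]
          have : ((g ++ [(prev, i)]).length : Int) = (g.length : Int) + 1 := by simp
          rw [hassoc, ← this]
          have := ih n i (i + 1) (ps ++ [prev]) (g ++ [(prev, i)]) (by omega) (by omega)
          simpa using this
        · rw [if_neg htwin, if_neg htwin, hassoc]
          have := ih n i (i + 1) (ps ++ [prev]) g (by omega) (by omega)
          simpa using this
      · rw [if_neg (fun h => hpr ((pvContA_eq_one_iff i hi).mp h)),
            if_neg (fun h => hpr ((pvEhPrimo_iff i hi).mp h))]
        exact ih n prev (i + 1) ps g (by omega) (by omega)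

-- ===== VERDICT (by name: the statement is the Claim_ definition above) =====
theorem primos_gemeos_spec : Claim_equal_primos_gemeos := by
  intro n _ hn
  unfold Spec_primos_gemeos primos_gemeos primos_gemeos_alt
  have h := pvLoop_eq (2 ^ 64) n 2 3 [] [] (by norm_num) (by simpa using hn)
  simpa using h
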